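-- pv_equiv track=rewrite | github.com/DarkSecret-7/Brotherhood-5.0 | app/utils.py | check_circularity
-- ===== SOURCE A (Python) =====
-- from typing import List, Set, Dict, Optional, Union
--
-- def check_circularity(nodes_deps: Dict[int, List[int]], start_node_id: int, new_prerequisites: List[int]) -> Optional[List[int]]:
--     """
--     Check if adding new_prerequisites to start_node_id creates a cycle.
--     Returns the cycle path if found, else None.
--     """
--     # Temporarily update the dependencies
--     temp_deps = nodes_deps.copy()
--     temp_deps[start_node_id] = new_prerequisites
--
--     visited = set()
--     stack = []
--     path = []
--
--     def visit(node_id: int):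
--         if node_id in stack:
--             # Cycle detected
--             cycle_start_idx = stack.index(node_id)
--             return stack[cycle_start_idx:] + [node_id]
--
--         if node_id in visited:
--             return None
--
--         visited.add(node_id)
--         stack.append(node_id)
--
--         for neighbor in temp_deps.get(node_id, []):
--             cycle = visit(neighbor)
--             if cycle:
--                 return cycle
--
--         stack.pop()
--         return None
--
--     # We only need to check cycles reachable from the start_node_id
--     return visit(start_node_id)
-- ===== SOURCE B (Python) =====
-- def check_circularity(nodes_deps, start_node_id, new_prerequisites):
--     """
--     Check if adding new_prerequisites to start_node_id creates a cycle.
--     Returns the cycle path if found, else None.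
--     """
--     temp_deps = nodes_deps.copy()
--     temp_deps[start_node_id] = new_prerequisites
--
--     visited = {start_node_id}
--     path = [start_node_id]
--     frames = [iter(temp_deps.get(start_node_id, []))]
--     while frames:
--         m = next(frames[-1], None)
--         if m is None:
--             frames.pop()
--             path.pop()
--         elif m in path:
--             return path[path.index(m):] + [m]
--         elif m not in visited:
--             visited.add(m)
--             path.append(m)
--             frames.append(iter(temp_deps.get(m, [])))
--     return None
-- ===== Notes on version B (the rewrite author's own statement) =====
-- stated objective: alternative
-- what changed: Replaces A's recursive visit() helper (call stack + shared mutable stack list) by an iterative DFS driven by an explicit stack of neighbor-iterator frames with a mirrored path list, checking 'on current path' before descending instead of at call entry.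
import Mathlib
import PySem

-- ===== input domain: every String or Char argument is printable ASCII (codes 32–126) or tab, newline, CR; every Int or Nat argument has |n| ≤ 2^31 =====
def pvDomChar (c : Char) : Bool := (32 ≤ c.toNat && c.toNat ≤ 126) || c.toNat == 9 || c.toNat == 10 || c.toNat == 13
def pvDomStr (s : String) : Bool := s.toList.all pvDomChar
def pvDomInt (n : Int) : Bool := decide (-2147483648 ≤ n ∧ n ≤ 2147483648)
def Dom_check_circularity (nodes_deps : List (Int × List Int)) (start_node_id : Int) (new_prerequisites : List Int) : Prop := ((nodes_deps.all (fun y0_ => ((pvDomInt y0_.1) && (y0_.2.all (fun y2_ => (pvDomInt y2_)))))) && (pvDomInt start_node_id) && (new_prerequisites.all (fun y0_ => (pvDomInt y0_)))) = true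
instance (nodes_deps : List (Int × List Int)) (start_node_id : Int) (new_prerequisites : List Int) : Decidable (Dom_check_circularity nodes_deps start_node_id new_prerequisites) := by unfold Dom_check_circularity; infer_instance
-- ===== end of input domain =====

-- B replaces A's recursive DFS helper by an iterative DFS with an explicit stack of
-- neighbor-iterator frames mirrored by a path list (objective: alternative decomposition,
-- same cost). Return-value equivalence only (neither version mutates its arguments).

-- ===== PORT A =====
-- fuel bound: more than the number of possible pushes (1 + all dependency-list entries);
-- a fuel artifact of the port only, Python A has no such bound.
def pvFuelA (nodes_deps : List (Int × List Int)) (new_prerequisites : List Int) : Nat :=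
  nodes_deps.foldl (fun a p => a + p.2.length) new_prerequisites.length + 2

mutual
  -- def visit(node_id): the recursive helper, with `visited`/`stack` threaded as state
  def visitA (temp : PySem.Dict Int (List Int)) (fuel : Nat) (node : Int)
      (stack : List Int) (visited : PySem.Set Int) : Option (List Int) × PySem.Set Int :=
    if node ∈ stack then
      (some (stack.drop ((PySem.List.index? stack node).getD 0) ++ [node]), visited)
    else if node ∈ visited then
      (none, visited)
    else
      match fuel with
      | 0 => (none, visited)  -- out of fuel: unreachable for the fuel bound used
      | fuel' + 1 =>
        visitForA temp fuel' (temp.getD node []) (stack ++ [node]) (visited.add node)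
  termination_by (fuel, 0, 0)

  -- the `for neighbor in temp_deps.get(node_id, []):` loop (early return on a cycle;
  -- returning none leaves the caller's stack as before the append = stack.pop())
  def visitForA (temp : PySem.Dict Int (List Int)) (fuel : Nat) (ms : List Int)
      (stack : List Int) (visited : PySem.Set Int) : Option (List Int) × PySem.Set Int :=
    match ms with
    | [] => (none, visited)
    | m :: ms' =>
      match visitA temp fuel m stack visited with
      | (some c, v') => (some c, v')
      | (none, v') => visitForA temp fuel ms' stack v'
  termination_by (fuel, 1, ms.length + 1)
end

def check_circularity (nodes_deps : List (Int × List Int)) (start_node_id : Int) (new_prerequisites : List Int) : Option (List Int) :=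
  ((visitA ((PySem.Dict.ofList nodes_deps).insert start_node_id new_prerequisites)
      (pvFuelA nodes_deps new_prerequisites) start_node_id [] PySem.Set.empty).1)

-- ===== PORT B =====
-- weight of one pending neighbor at a given frame fuel (termination measure only)
def pvW (L : Nat) : Nat → Nat
  | 0 => 1
  | f + 1 => L * pvW L f + 2

-- measure of the frame stack (termination only)
def pvMu (L : Nat) (frames : List (Nat × List Int)) : Nat :=
  frames.foldl (fun a fr => a + 1 + fr.2.length * pvW L fr.1) 0

lemma pvW_pos (L f : Nat) : 0 < pvW L f := by cases f <;> simp [pvW]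

lemma pvMu_cons (L : Nat) (fr : Nat × List Int) (fs : List (Nat × List Int)) :
    pvMu L (fr :: fs) = 1 + fr.2.length * pvW L fr.1 + pvMu L fs := by
  simp only [pvMu, List.foldl_cons]
  rw [show (0 + 1 + fr.2.length * pvW L fr.1) = (1 + fr.2.length * pvW L fr.1) + 0 by omega]
  generalize (1 + fr.2.length * pvW L fr.1) = c
  induction fs generalizing c with
  | nil => simp
  | cons x xs ih => simp only [List.foldl_cons]; rw [ih, ih (0 + 1 + x.2.length * pvW L x.1)]; omega

-- the longest dependency list in temp (bounds the lists pushed as new frames)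
def pvMaxLen (temp : PySem.Dict Int (List Int)) : Nat :=
  temp.values.foldl (fun a vs => max a vs.length) 0

lemma pvGetD_len_le (temp : PySem.Dict Int (List Int)) (m : Int) :
    (temp.getD m []).length ≤ pvMaxLen temp := by
  rcases hg : temp.get? m with _ | v
  · simp [PySem.Dict.getD, hg]
  · have hv : v ∈ temp.values := by
      simp only [PySem.Dict.get?, Option.map_eq_some_iff] at hg
      obtain ⟨p, hfind, hpv⟩ := hg
      exact hpv ▸ List.mem_map_of_mem (List.mem_of_find?_eq_some hfind)
    have key : ∀ (l : List (List Int)) (a : Nat), a ≤ l.foldl (fun a vs => max a vs.length) a ∧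
        (∀ vs ∈ l, vs.length ≤ l.foldl (fun a vs => max a vs.length) a) := by
      intro l
      induction l with
      | nil => simp
      | cons y ys ih =>
        intro a
        refine ⟨?_, ?_⟩
        · have := (ih (max a y.length)).1; simp only [List.foldl_cons]; omega
        · intro vs hvs
          simp only [List.foldl_cons]
          rcases List.mem_cons.1 hvs with h1 | h1
          · subst h1; have := (ih (max a vs.length)).1; omega
          · exact (ih (max a y.length)).2 vs h1
    have := (key temp.values 0).2 _ hv
    simpa [PySem.Dict.getD, hg, pvMaxLen] using this

lemma pvMu_pop (L f : Nat) (fs : List (Nat × List Int)) :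
    pvMu L fs < pvMu L ((f, ([] : List Int)) :: fs) := by
  simp only [pvMu_cons]; omega

lemma pvMu_skip (L f : Nat) (m : Int) (ms : List Int) (fs : List (Nat × List Int)) :
    pvMu L ((f, ms) :: fs) < pvMu L ((f, m :: ms) :: fs) := by
  have := pvW_pos L f
  simp only [pvMu_cons, List.length_cons, Nat.add_mul, Nat.one_mul]; omega

lemma pvMu_push (L k : Nat) (ds : List Int) (m : Int) (ms : List Int)
    (fs : List (Nat × List Int)) (h : ds.length ≤ L) :
    pvMu L ((k, ds) :: (k + 1, ms) :: fs) < pvMu L ((k + 1, m :: ms) :: fs) := by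
  have h3 : ds.length * pvW L k ≤ L * pvW L k := Nat.mul_le_mul_right _ h
  simp only [pvMu_cons, List.length_cons, Nat.add_mul, Nat.one_mul, pvW]; omega

def loopB (temp : PySem.Dict Int (List Int)) :
    List (Nat × List Int) → List Int → PySem.Set Int → Option (List Int)
  | [], _, _ => none
  | (_, []) :: fs, path, visited => loopB temp fs path.dropLast visited
  | (f, m :: ms) :: fs, path, visited =>
    if m ∈ path then
      some (path.drop ((PySem.List.index? path m).getD 0) ++ [m])
    else if m ∈ visited then
      loopB temp ((f, ms) :: fs) path visited
    else
      match f with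
      | 0 => loopB temp ((0, ms) :: fs) path visited  -- out of fuel: unreachable
      | k + 1 =>
        loopB temp ((k, temp.getD m []) :: (k + 1, ms) :: fs) (path ++ [m]) (visited.add m)
termination_by frames _ _ => pvMu (pvMaxLen temp) frames
decreasing_by
  · exact pvMu_pop _ _ _
  · exact pvMu_skip _ _ _ _ _
  · exact pvMu_skip _ _ _ _ _
  · exact pvMu_push _ _ _ _ _ _ (pvGetD_len_le temp m)

def check_circularity_alt (nodes_deps : List (Int × List Int)) (start_node_id : Int) (new_prerequisites : List Int) : Option (List Int) :=
  loopB ((PySem.Dict.ofList nodes_deps).insert start_node_id new_prerequisites)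
    [(pvFuelA nodes_deps new_prerequisites - 1,
      ((PySem.Dict.ofList nodes_deps).insert start_node_id new_prerequisites).getD start_node_id [])]
    [start_node_id] (PySem.Set.empty.add start_node_id)

-- ===== PRECONDITION & SPEC =====
def Spec_check_circularity (nodes_deps : List (Int × List Int)) (start_node_id : Int) (new_prerequisites : List Int) (out : Option (List Int)) : Prop := out = check_circularity_alt nodes_deps start_node_id new_prerequisites
instance (nodes_deps : List (Int × List Int)) (start_node_id : Int) (new_prerequisites : List Int) (out : Option (List Int)) : Decidable (Spec_check_circularity nodes_deps start_node_id new_prerequisites out) := by unfold Spec_check_circularity; infer_instance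

-- ===== CLAIM (what is proved, stated in full; the proofs are below) =====
def Claim_equal_check_circularity : Prop := ∀ (nodes_deps : List (Int × List Int)) (start_node_id : Int) (new_prerequisites : List Int), Dom_check_circularity nodes_deps start_node_id new_prerequisites → Spec_check_circularity nodes_deps start_node_id new_prerequisites (check_circularity nodes_deps start_node_id new_prerequisites)

-- ===== LEMMAS AND PROOFS =====

-- unfolding equations (the well-founded definitions unfold via .eq_def)
lemma visitA_eq (temp : PySem.Dict Int (List Int)) (fuel : Nat) (node : Int)
    (stack : List Int) (visited : PySem.Set Int) :
    visitA temp fuel node stack visited =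
      (if node ∈ stack then
        (some (stack.drop ((PySem.List.index? stack node).getD 0) ++ [node]), visited)
      else if node ∈ visited then
        (none, visited)
      else
        match fuel with
        | 0 => (none, visited)
        | fuel' + 1 =>
          visitForA temp fuel' (temp.getD node []) (stack ++ [node]) (visited.add node)) := by
  rw [visitA.eq_def]

lemma visitForA_nil (temp : PySem.Dict Int (List Int)) (fuel : Nat)
    (stack : List Int) (visited : PySem.Set Int) :
    visitForA temp fuel [] stack visited = (none, visited) := by
  rw [visitForA.eq_def]

lemma visitForA_cons (temp : PySem.Dict Int (List Int)) (fuel : Nat) (m : Int) (ms : List Int)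
    (stack : List Int) (visited : PySem.Set Int) :
    visitForA temp fuel (m :: ms) stack visited =
      (match visitA temp fuel m stack visited with
       | (some c, v') => (some c, v')
       | (none, v') => visitForA temp fuel ms stack v') := by
  rw [visitForA.eq_def]

lemma loopB_nil (temp : PySem.Dict Int (List Int)) (path : List Int) (visited : PySem.Set Int) :
    loopB temp [] path visited = none := by
  rw [loopB.eq_def]

lemma loopB_pop (temp : PySem.Dict Int (List Int)) (f : Nat) (fs : List (Nat × List Int))
    (path : List Int) (visited : PySem.Set Int) :
    loopB temp ((f, ([] : List Int)) :: fs) path visited = loopB temp fs path.dropLast visited := by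
  rw [loopB.eq_def]

lemma loopB_cons (temp : PySem.Dict Int (List Int)) (f : Nat) (m : Int) (ms : List Int)
    (fs : List (Nat × List Int)) (path : List Int) (visited : PySem.Set Int) :
    loopB temp ((f, m :: ms) :: fs) path visited =
      (if m ∈ path then
        some (path.drop ((PySem.List.index? path m).getD 0) ++ [m])
      else if m ∈ visited then
        loopB temp ((f, ms) :: fs) path visited
      else
        match f with
        | 0 => loopB temp ((0, ms) :: fs) path visited
        | k + 1 =>
          loopB temp ((k, temp.getD m []) :: (k + 1, ms) :: fs) (path ++ [m]) (visited.add m)) := by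
  rw [loopB.eq_def]

-- the frame stack interpreted through A's semantics: run A's for-loop on the top frame,
-- pop on none, propagate a cycle
def interpB (temp : PySem.Dict Int (List Int)) :
    List (Nat × List Int) → List Int → PySem.Set Int → Option (List Int)
  | [], _, _ => none
  | (f, ms) :: fs, path, visited =>
    match visitForA temp f ms path visited with
    | (some c, _) => some c
    | (none, v') => interpB temp fs path.dropLast v'

lemma interpB_nil (temp : PySem.Dict Int (List Int)) (path : List Int) (visited : PySem.Set Int) :
    interpB temp [] path visited = none := rfl

lemma interpB_cons (temp : PySem.Dict Int (List Int)) (f : Nat) (ms : List Int)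
    (fs : List (Nat × List Int)) (path : List Int) (visited : PySem.Set Int) :
    interpB temp ((f, ms) :: fs) path visited =
      (match visitForA temp f ms path visited with
       | (some c, _) => some c
       | (none, v') => interpB temp fs path.dropLast v') := rfl

lemma loopB_eq_interpB (temp : PySem.Dict Int (List Int))
    (frames : List (Nat × List Int)) (path : List Int) (visited : PySem.Set Int) :
    loopB temp frames path visited = interpB temp frames path visited := by
  induction frames, path, visited using loopB.induct temp with
  | case1 path visited => rw [loopB_nil, interpB_nil]
  | case2 f fs path visited ih =>
    rw [loopB_pop, ih, interpB_cons, visitForA_nil]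
  | case3 f m ms fs path visited hmem =>
    rw [loopB_cons, interpB_cons, visitForA_cons, visitA_eq]
    simp [hmem]
  | case4 f m ms fs path visited hmem hvis ih =>
    rw [loopB_cons, interpB_cons, visitForA_cons, visitA_eq]
    simp only [hmem, hvis, if_neg, if_pos, not_false_eq_true]
    rw [ih, interpB_cons]
  | case5 m ms fs path visited hmem hvis ih =>
    rw [loopB_cons, interpB_cons, visitForA_cons, visitA_eq]
    simp only [hmem, hvis, if_neg, not_false_eq_true]
    rw [ih, interpB_cons]
  | case6 m ms fs path visited hmem hvis k ih =>
    rw [loopB_cons, interpB_cons, visitForA_cons, visitA_eq]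
    simp only [hmem, hvis, if_neg, not_false_eq_true]
    rw [ih, interpB_cons]
    rcases h : visitForA temp k (temp.getD m []) (path ++ [m]) (visited.add m) with ⟨r, v'⟩
    cases r with
    | some c => simp
    | none => simp [interpB_cons]

-- ===== VERDICT (by name: the statement is the Claim_ definition above) =====
theorem check_circularity_spec : Claim_equal_check_circularity := by
  intro nodes_deps start new _
  unfold Spec_check_circularity check_circularity check_circularity_alt
  have hfa : pvFuelA nodes_deps new = (pvFuelA nodes_deps new - 1) + 1 := by
    unfold pvFuelA; omega
  have hempty : start ∉ (PySem.Set.empty : PySem.Set Int) := by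
    simp [PySem.Set.empty]
  rw [visitA_eq, hfa]
  simp only [Nat.add_sub_cancel, List.not_mem_nil, if_false, hempty, List.nil_append]
  rw [loopB_eq_interpB, interpB_cons]
  rcases h : visitForA ((PySem.Dict.ofList nodes_deps).insert start new)
      (pvFuelA nodes_deps new - 1)
      (((PySem.Dict.ofList nodes_deps).insert start new).getD start []) [start]
      (PySem.Set.empty.add start) with ⟨r, v'⟩
  cases r <;> simp [interpB_nil]
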